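-- pv_equiv track=rewrite | github.com/OCHA-DAP/hdx-python-api | src/hdx/utilities/dictandlist.py | list_distribute_contents_simple
-- ===== SOURCE A (Python) =====
-- def dict_of_lists_add(dictionary, key, value):
--     # type: (DictUpperBound, Any, Any) -> None
--     """Add value to a list in a dictionary by key
--
--     Args:
--         dictionary (DictUpperBound): Dictionary to which to add values
--         key (Any): Key within dictionary
--         value (Any): Value to add to list in dictionary
--
--     Returns:
--         None
--
--     """
--     list_objs = dictionary.get(key, list())
--     list_objs.append(value)
--     dictionary[key] = list_objs
--
-- def list_distribute_contents_simple(input_list, function=lambda x: x):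
--     # type: (List, Callable[[Any], Any]) -> List
--     """Distribute the contents of a list eg. [1, 1, 1, 2, 2, 3] -> [1, 2, 3, 1, 2, 1]. List can contain complex types
--     like dictionaries in which case the function can return the appropriate value eg.  lambda x: x[KEY]
--
--     Args:
--         input_list (List): List to distribute values
--         function (Callable[[Any], Any]): Return value to use for distributing. Defaults to lambda x: x.
--
--     Returns:
--         List: Distributed list
--
--     """
--     dictionary = dict()
--     for obj in input_list:
--         dict_of_lists_add(dictionary, function(obj), obj)
--     output_list = list()
--     i = 0
--     done = False
--     while not done:
--         found = False
--         for key in sorted(dictionary):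
--             if i < len(dictionary[key]):
--                 output_list.append(dictionary[key][i])
--                 found = True
--         if found:
--             i += 1
--         else:
--             done = True
--     return output_list
-- ===== SOURCE B (Python) =====
-- def list_distribute_contents_simple(input_list, function=lambda x: x):
--     groups = {}
--     for obj in input_list:
--         groups.setdefault(function(obj), []).append(obj)
--     active = [groups[k] for k in sorted(groups)]
--     out = []
--     while active:
--         out.extend(lst[0] for lst in active)
--         active = [lst[1:] for lst in active if lst[1:]]
--     return out
-- ===== Notes on version B (the rewrite author's own statement) =====
-- stated objective: faster
-- what changed: A re-sorts all keys and re-scans every group (indexing by a round counter i) on every round of the while loop; B sorts the keys once, then keeps a shrinking list of active group suffixes, popping each group's head per round and dropping exhausted groups.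
import Mathlib
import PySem

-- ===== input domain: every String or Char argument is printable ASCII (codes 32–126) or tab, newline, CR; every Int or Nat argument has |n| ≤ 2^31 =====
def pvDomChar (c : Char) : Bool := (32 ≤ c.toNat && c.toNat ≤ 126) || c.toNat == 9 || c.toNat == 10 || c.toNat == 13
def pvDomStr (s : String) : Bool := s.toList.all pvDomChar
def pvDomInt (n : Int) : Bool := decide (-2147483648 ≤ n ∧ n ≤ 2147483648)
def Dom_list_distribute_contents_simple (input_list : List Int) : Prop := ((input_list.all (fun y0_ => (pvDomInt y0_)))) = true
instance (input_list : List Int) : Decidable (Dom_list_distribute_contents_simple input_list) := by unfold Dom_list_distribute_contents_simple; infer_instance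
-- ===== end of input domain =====

-- B replaces A's per-round re-sort of the keys (and index i) by one sort up front and a shrinking
-- list of active (suffix) groups; equivalence of return values is proved below (neither mutates input).

-- ===== PORT A =====
-- dict_of_lists_add: list_objs = dictionary.get(key, []); list_objs.append(value); dictionary[key] = list_objs
def pvDictOfListsAdd (d : PySem.Dict Int (List Int)) (k v : Int) : PySem.Dict Int (List Int) :=
  let listObjs := (d.get? k).getD []
  d.insert k (listObjs ++ [v])

-- the first loop: for obj in input_list: dict_of_lists_add(dictionary, function(obj), obj), function = identity
def pvBuildA (input_list : List Int) : PySem.Dict Int (List Int) :=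
  input_list.foldl (fun d obj => pvDictOfListsAdd d obj obj) PySem.Dict.empty

-- body of the inner 'for key in sorted(dictionary)' loop; state = (output_list, found);
-- dictionary[key] never raises (key ∈ keys) so getD [] is exact; dictionary[key][i] is guarded by i < len
def pvRowStep (d : PySem.Dict Int (List Int)) (i : Nat) (s : List Int × Bool) (k : Int) : List Int × Bool :=
  let l := d.getD k []
  if i < l.length then (s.1 ++ [l.getD i 0], true) else s

-- proof-side bound used only for termination of the while loop
def pvMaxLenA (d : PySem.Dict Int (List Int)) : Nat :=
  d.keys.foldl (fun acc k => max acc (d.getD k []).length) 0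

theorem pvRowStep_found (d : PySem.Dict Int (List Int)) (i : Nat) :
    ∀ (ks : List Int) (o : List Int) (b : Bool),
      (ks.foldl (pvRowStep d i) (o, b)).2 = true → b = true ∨ ∃ k ∈ ks, i < (d.getD k []).length := by
  intro ks
  induction ks with
  | nil => intro o b h; exact Or.inl h
  | cons k t ih =>
    intro o b h
    simp only [List.foldl_cons] at h
    unfold pvRowStep at h
    by_cases hk : i < (d.getD k []).length
    · exact Or.inr ⟨k, by simp, hk⟩
    · simp only [if_neg hk] at h
      rcases ih o b h with hb | ⟨k', hk', hl⟩
      · exact Or.inl hb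
      · exact Or.inr ⟨k', by simp [hk'], hl⟩

theorem pvFound_lt_maxLen (d : PySem.Dict Int (List Int)) (i : Nat) (out : List Int)
    (h : ((PySem.List.sorted d.keys (fun x => x) false).foldl (pvRowStep d i) (out, false)).2 = true) :
    i < pvMaxLenA d := by
  rcases pvRowStep_found d i _ out false h with hb | ⟨k, hk, hl⟩
  · exact absurd hb (by simp)
  · have hk' : k ∈ d.keys := (PySem.List.mem_sorted _ _ _ _).1 hk
    have := (PySem.List.le_foldl_max_nat d.keys (fun k => (d.getD k []).length) 0).2 k hk'
    unfold pvMaxLenA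
    omega

-- while not done: found = False; for key in sorted(dictionary): …; if found: i += 1 else: done = True
def pvLoopA (d : PySem.Dict Int (List Int)) (i : Nat) (out : List Int) : List Int :=
  let s := (PySem.List.sorted d.keys (fun x => x) false).foldl (pvRowStep d i) (out, false)
  if h : s.2 = true then pvLoopA d (i + 1) s.1 else s.1
termination_by pvMaxLenA d - i
decreasing_by
  have := pvFound_lt_maxLen d i out h
  omega

def list_distribute_contents_simple (input_list : List Int) : List Int :=
  pvLoopA (pvBuildA input_list) 0 []

-- ===== PORT B =====
-- groups.setdefault(function(obj), []).append(obj): net effect d[k] = d.get(k, []) + [obj], key keeps first position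
def pvBuildB (input_list : List Int) : PySem.Dict Int (List Int) :=
  input_list.foldl (fun d obj => d.insert obj (d.getD obj [] ++ [obj])) PySem.Dict.empty

-- proof-side measure bound, cited by pvLoopB's decreasing_by
theorem pvSumLenSucc (xs : List (List Int)) :
    (xs.map (fun l => l.length +  1)).sum = (xs.map List.length).sum + xs.length := by
  induction xs with
  | nil => simp
  | cons l t ih => simp only [List.map_cons, List.sum_cons, List.length_cons]; omega

theorem pvLoopB_measure (active : List (List Int)) :
    ((active.filterMap (fun lst => if lst.tail = [] then none else some lst.tail)).map
        (fun l => l.length + 1)).sum ≤ (active.map List.length).sum := by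
  induction active with
  | nil => simp
  | cons l t ih =>
    by_cases h : l.tail = []
    · have h2 := pvSumLenSucc (t.filterMap (fun lst => if lst.tail = [] then none else some lst.tail))
      simp [h]
      omega
    · have hl : l.tail.length = l.length - 1 := by simp
      have hpos : 1 ≤ l.tail.length := List.length_pos_of_ne_nil h
      have h2 := pvSumLenSucc (t.filterMap (fun lst => if lst.tail = [] then none else some lst.tail))
      simp [if_neg h]
      omega

-- while active: out.extend(lst[0] for lst in active); active = [lst[1:] for lst in active if lst[1:]]
-- lst[0] is guarded by the loop invariant (every active list is nonempty), so getD 0 is exact; lst[1:] = tail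
def pvLoopB (active : List (List Int)) (out : List Int) : List Int :=
  if active = [] then out
  else
    pvLoopB (active.filterMap (fun lst => if lst.tail = [] then none else some lst.tail))
      (out ++ active.map (fun lst => lst.getD 0 0))
termination_by (active.map (fun l => l.length + 1)).sum
decreasing_by
  simp only [List.filterMap_subtype, List.unattach_attach, dite_eq_ite]
  have h1 := pvLoopB_measure active
  have h2 : active.length ≥ 1 := List.length_pos_of_ne_nil (by assumption)
  have h3 := pvSumLenSucc active
  omega

def list_distribute_contents_simple_alt (input_list : List Int) : List Int :=
  let groups := pvBuildB input_list
  let active := (PySem.List.sorted groups.keys (fun x => x) false).map (fun k => groups.getD k [])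
  pvLoopB active []

-- ===== PRECONDITION & SPEC =====
def Spec_list_distribute_contents_simple (input_list : List Int) (out : List Int) : Prop := out = list_distribute_contents_simple_alt input_list
instance (input_list : List Int) (out : List Int) : Decidable (Spec_list_distribute_contents_simple input_list out) := by unfold Spec_list_distribute_contents_simple; infer_instance

-- ===== CLAIM (what is proved, stated in full; the proofs are below) =====
def Claim_equal_list_distribute_contents_simple : Prop := ∀ (input_list : List Int), Dom_list_distribute_contents_simple input_list → Spec_list_distribute_contents_simple input_list (list_distribute_contents_simple input_list)

-- ===== LEMMAS AND PROOFS =====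

-- the active groups A's round i still draws from: suffixes from index i of the groups with > i elements
def pvActOf (d : PySem.Dict Int (List Int)) (i : Nat) (ks : List Int) : List (List Int) :=
  ks.filterMap (fun k =>
    let l := d.getD k []
    if i < l.length then some (l.drop i) else none)

theorem pvRow_eq (d : PySem.Dict Int (List Int)) (i : Nat) :
    ∀ (ks : List Int) (o : List Int) (b : Bool),
      ks.foldl (pvRowStep d i) (o, b)
        = (o ++ (pvActOf d i ks).map (fun l => l.getD 0 0), b || !(pvActOf d i ks).isEmpty) := by
  intro ks
  induction ks with
  | nil => intro o b; simp [pvActOf]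
  | cons k t ih =>
    intro o b
    rw [List.foldl_cons]
    by_cases hk : i < (d.getD k []).length
    · have hstep : pvRowStep d i (o, b) k = (o ++ [(d.getD k []).getD i 0], true) := by
        simp [pvRowStep, hk]
      rw [hstep, ih]
      simp [pvActOf, if_pos hk]
    · have hstep : pvRowStep d i (o, b) k = (o, b) := by
        simp [pvRowStep, hk]
      rw [hstep, ih]
      simp [pvActOf, hk]

theorem pvActOf_succ (d : PySem.Dict Int (List Int)) (i : Nat) (ks : List Int) :
    pvActOf d (i + 1) ks
      = (pvActOf d i ks).filterMap (fun lst => if lst.tail = [] then none else some lst.tail) := by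
  induction ks with
  | nil => simp [pvActOf]
  | cons k t ih =>
    unfold pvActOf
    simp only [List.filterMap_cons]
    by_cases hk : i < (d.getD k []).length
    · simp only [if_pos hk, List.filterMap_cons]
      have htail : ((d.getD k []).drop i).tail = (d.getD k []).drop (i + 1) := by
        rw [List.tail_drop]
      by_cases hk1 : i + 1 < (d.getD k []).length
      · have hne : (d.getD k []).drop (i + 1) ≠ [] := by
          simp [List.drop_eq_nil_iff]; omega
        simp only [if_pos hk1, htail, if_neg hne]
        exact congrArg _ ih
      · have heq : (d.getD k []).drop (i + 1) = [] := by
          simp [List.drop_eq_nil_iff]; omega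
        simp only [if_neg hk1, htail, heq]
        exact ih
    · have hk1 : ¬ i + 1 < (d.getD k []).length := by omega
      simp only [if_neg hk, if_neg hk1]
      exact ih

theorem pvLoopAB (d : PySem.Dict Int (List Int)) (i : Nat) (out : List Int) :
    pvLoopA d i out = pvLoopB (pvActOf d i (PySem.List.sorted d.keys (fun x => x) false)) out := by
  rw [pvLoopA]
  rw [pvRow_eq]
  by_cases hne : pvActOf d i (PySem.List.sorted d.keys (fun x => x) false) = []
  · simp only [hne]
    rw [pvLoopB.eq_def]
    simp
  · have hfound : (false || !(pvActOf d i (PySem.List.sorted d.keys (fun x => x) false)).isEmpty) = true := by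
      simp [hne]
    simp only [hfound, dif_pos]
    rw [pvLoopAB d (i + 1) _]
    conv_rhs => rw [pvLoopB.eq_def]
    simp only [if_neg hne]
    rw [pvActOf_succ]
termination_by pvMaxLenA d - i
decreasing_by
  have h := pvFound_lt_maxLen d i out (by rw [pvRow_eq]; exact hfound)
  omega

-- every list stored in the built dictionary is nonempty
theorem pvBuild_nonempty (input_list : List Int) :
    ∀ k ∈ (pvBuildB input_list).keys, (pvBuildB input_list).getD k [] ≠ [] := by
  unfold pvBuildB
  induction input_list using List.reverseRecOn with
  | nil => simp [PySem.Dict.keys_empty]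
  | append_singleton t x ih =>
    intro k hk
    rw [List.foldl_append] at hk ⊢
    simp only [List.foldl_cons, List.foldl_nil] at hk ⊢
    rw [PySem.Dict.getD_insert]
    by_cases hkx : k = x
    · simp [hkx]
    · simp only [if_neg hkx]
      rw [PySem.Dict.mem_keys_insert] at hk
      exact ih k (hk.resolve_left hkx)

-- A and B build the same dictionary (get(k, []) vs getD)
theorem pvBuild_eq (input_list : List Int) : pvBuildA input_list = pvBuildB input_list := by
  unfold pvBuildA pvBuildB pvDictOfListsAdd
  apply PySem.List.foldl_congr_mem
  intro d x _
  rw [PySem.Dict.getD_eq_get?_getD]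

-- over keys with nonempty groups, the round-0 active list is just the groups themselves
theorem pvActOf_zero (d : PySem.Dict Int (List Int)) :
    ∀ ks : List Int, (∀ k ∈ ks, d.getD k [] ≠ []) →
      ks.map (fun k => d.getD k []) = pvActOf d 0 ks := by
  intro ks
  induction ks with
  | nil => intro _; simp [pvActOf]
  | cons k t ih =>
    intro h
    have hk : d.getD k [] ≠ [] := h k (by simp)
    have hlen : 0 < (d.getD k []).length := List.length_pos_of_ne_nil hk
    unfold pvActOf
    simp only [List.map_cons, List.filterMap_cons, if_pos hlen, List.drop_zero]
    rw [ih (fun k' hk' => h k' (by simp [hk']))]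
    rfl

-- the initial active list of B is pvActOf at round 0
theorem pvInit_eq (input_list : List Int) :
    (PySem.List.sorted (pvBuildB input_list).keys (fun x => x) false).map
        (fun k => (pvBuildB input_list).getD k [])
      = pvActOf (pvBuildB input_list) 0 (PySem.List.sorted (pvBuildB input_list).keys (fun x => x) false) := by
  apply pvActOf_zero
  intro k hk
  exact pvBuild_nonempty input_list k ((PySem.List.mem_sorted _ _ _ _).1 hk)

-- ===== VERDICT (by name: the statement is the Claim_ definition above) =====
theorem list_distribute_contents_simple_spec : Claim_equal_list_distribute_contents_simple := by
  intro input_list _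
  unfold Spec_list_distribute_contents_simple list_distribute_contents_simple list_distribute_contents_simple_alt
  show pvLoopA (pvBuildA input_list) 0 []
      = pvLoopB ((PySem.List.sorted (pvBuildB input_list).keys (fun x => x) false).map
          (fun k => (pvBuildB input_list).getD k [])) []
  rw [pvBuild_eq, pvLoopAB, pvInit_eq]
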